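-- pv_equiv track=rewrite | github.com/urvesh254/30DaysOfCode-PhoenixClub | day-23-of-30/Many, Still One/Python/urveshpatel.py | solve
-- ===== SOURCE A (Python) =====
-- def solve(nums):
--     f = True
--     for i in range(1, len(nums)):
--         if not f and nums[i] == 1:
--             return False
--         elif f and nums[i - 1] == 1 and nums[i] != 1:
--             f = False
--     return True
-- ===== SOURCE B (Python) =====
-- def solve(nums):
--     idx = [i for i, x in enumerate(nums) if x == 1]
--     return not idx or idx[-1] - idx[0] + 1 == len(idx)
-- ===== Notes on version B (the rewrite author's own statement) =====
-- stated objective: simpler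
-- what changed: Replaced A's stateful left-to-right flag scan over adjacent pairs with a collect-then-check decomposition: gather the indices of elements equal to one and test contiguity by the closed span formula last index minus first index plus one equals the number of such indices.
import Mathlib
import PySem

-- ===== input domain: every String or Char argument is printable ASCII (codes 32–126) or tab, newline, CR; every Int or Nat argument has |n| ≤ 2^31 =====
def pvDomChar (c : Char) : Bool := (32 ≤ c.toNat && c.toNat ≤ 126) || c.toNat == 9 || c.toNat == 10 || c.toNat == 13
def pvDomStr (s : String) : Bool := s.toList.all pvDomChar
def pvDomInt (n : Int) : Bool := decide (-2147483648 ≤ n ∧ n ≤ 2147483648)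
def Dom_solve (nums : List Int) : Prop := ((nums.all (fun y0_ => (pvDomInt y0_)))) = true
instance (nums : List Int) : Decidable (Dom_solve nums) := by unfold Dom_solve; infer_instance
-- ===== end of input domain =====

-- B replaces A's stateful flag scan by collecting the indices of 1s and checking
-- their span arithmetically (objective: simpler decomposition, same O(n) cost).

-- ===== PORT A =====
-- the loop 'for i in range(1, len(nums))' carries prev = nums[i-1] structurally
def solveGo (prev : Int) (rest : List Int) (f : Bool) : Bool :=
  match rest with
  | [] => true
  | x :: r =>
    if !f && x == 1 then false
    else if f && prev == 1 && x != 1 then solveGo x r false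
    else solveGo x r f

def solve (nums : List Int) : Bool :=
  match nums with
  | [] => true
  | a :: r => solveGo a r true

-- ===== PORT B =====
def solve_alt (nums : List Int) : Bool :=
  let idx := ((PySem.List.enumerate nums 0).filter (fun p => p.2 == 1)).map (fun p => p.1)
  if idx.isEmpty then true
  else idx.getLastD 0 - idx.headD 0 + 1 == (idx.length : Int)

-- ===== PRECONDITION & SPEC =====
def Spec_solve (nums : List Int) (out : Bool) : Prop := out = solve_alt nums
instance (nums : List Int) (out : Bool) : Decidable (Spec_solve nums out) := by unfold Spec_solve; infer_instance

-- ===== CLAIM (what is proved, stated in full; the proofs are below) =====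
def Claim_equal_solve : Prop := ∀ (nums : List Int), Dom_solve nums → Spec_solve nums (solve nums)

-- ===== LEMMAS AND PROOFS =====

-- positions (offset s) of elements equal to 1, as computed by solve_alt
def pvPos (s : Int) (l : List Int) : List Int :=
  ((PySem.List.enumerate l s).filter (fun p => p.2 == 1)).map (fun p => p.1)

-- span test, as computed by solve_alt
def pvTest (p : List Int) : Bool :=
  if p.isEmpty then true else p.getLastD 0 - p.headD 0 + 1 == (p.length : Int)

-- proof-side characterisation of A's automaton
def pvOnes1 : List Int → Bool
  | [] => true
  | x :: l => if x == 1 then pvOnes1 l else l.all (fun y => y != 1)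

def pvContig : List Int → Bool
  | [] => true
  | x :: l => if x == 1 then pvOnes1 l else pvContig l

theorem pvPos_cons (s : Int) (x : Int) (l : List Int) :
    pvPos s (x :: l) = (if x == 1 then [s] else []) ++ pvPos (s + 1) l := by
  simp only [pvPos, PySem.List.enumerate_cons, List.filter_cons]
  by_cases h : x = 1 <;> simp [h]

theorem pvPos_nil_iff (l : List Int) : ∀ s : Int, (pvPos s l = [] ↔ l.all (fun y => y != 1) = true) := by
  induction l with
  | nil => intro s; simp [pvPos]
  | cons x l ih =>
    intro s
    rw [pvPos_cons]
    by_cases h : x = 1 <;> simp [h, ih (s + 1)]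

theorem pvPos_last_ge (l : List Int) : ∀ s : Int, pvPos s l ≠ [] →
    s + ((pvPos s l).length : Int) - 1 ≤ (pvPos s l).getLastD 0 := by
  induction l with
  | nil => intro s h; simp [pvPos] at h
  | cons x l ih =>
    intro s h
    rw [pvPos_cons] at h ⊢
    rcases eq_or_ne x 1 with hx | hx
    · subst hx
      simp only [show ((1 : Int) == 1) = true from rfl, if_true, List.singleton_append] at h ⊢
      rcases hQ : pvPos (s + 1) l with _ | ⟨q, Q⟩
      · simp
      · have hle := ih (s + 1) (by rw [hQ]; simp)
        rw [hQ] at hle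
        simp only [List.getLastD_cons, List.length_cons] at hle ⊢
        push_cast at hle ⊢
        omega
    · have hb : (x == 1) = false := by simp [hx]
      simp only [hb, Bool.false_eq_true, if_false, List.nil_append] at h ⊢
      have hle := ih (s + 1) h
      omega

theorem pvOnes1_eq (l : List Int) : ∀ s : Int, pvOnes1 l =
    decide (pvPos s l = [] ∨ (pvPos s l).getLastD 0 + 1 = s + ((pvPos s l).length : Int)) := by
  induction l with
  | nil => intro s; simp [pvPos, pvOnes1]
  | cons x l ih =>
    intro s
    rw [pvPos_cons]
    rcases eq_or_ne x 1 with hx | hx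
    · subst hx
      rw [show pvOnes1 (1 :: l) = pvOnes1 l by simp [pvOnes1]]
      rcases hQ : pvPos (s + 1) l with _ | ⟨q, Q⟩
      · rw [ih (s + 1), hQ]; simp
      · rw [ih (s + 1), hQ]
        simp only [show ((1 : Int) == 1) = true from rfl, if_true, List.singleton_append]
        rw [Bool.eq_iff_iff]
        simp only [decide_eq_true_eq, List.cons_ne_nil, false_or, List.getLastD_cons,
          List.length_cons]
        push_cast
        omega
    · have hb : (x == 1) = false := by simp [hx]
      rw [show pvOnes1 (x :: l) = l.all (fun y => y != 1) by simp [pvOnes1, hx]]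
      simp only [hb, Bool.false_eq_true, if_false, List.nil_append]
      rcases hQ : pvPos (s + 1) l with _ | ⟨q, Q⟩
      · simp [(pvPos_nil_iff l (s + 1)).mp hQ]
      · have hlast := pvPos_last_ge l (s + 1) (by rw [hQ]; simp)
        rw [hQ] at hlast
        have hne : l.all (fun y => y != 1) = false := by
          cases h : l.all (fun y => y != 1)
          · rfl
          · exact absurd ((pvPos_nil_iff l (s + 1)).mpr h) (by rw [hQ]; simp)
        rw [hne]
        symm
        rw [decide_eq_false_iff_not]
        simp only [List.getLastD_cons, List.length_cons, List.cons_ne_nil, false_or] at hlast ⊢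
        push_cast at hlast ⊢
        omega

theorem pvContig_eq (l : List Int) : ∀ s : Int, pvTest (pvPos s l) = pvContig l := by
  induction l with
  | nil => intro s; simp [pvPos, pvTest, pvContig]
  | cons x l ih =>
    intro s
    rw [pvPos_cons]
    rcases eq_or_ne x 1 with hx | hx
    · subst hx
      rw [show pvContig (1 :: l) = pvOnes1 l by simp [pvContig]]
      rw [pvOnes1_eq l (s + 1)]
      simp only [show ((1 : Int) == 1) = true from rfl, if_true, List.singleton_append]
      rcases hQ : pvPos (s + 1) l with _ | ⟨q, Q⟩
      · simp [pvTest]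
      · rw [Bool.eq_iff_iff]
        simp only [pvTest, List.isEmpty_cons, Bool.false_eq_true, if_false,
          List.getLastD_cons, List.headD_cons, List.length_cons, beq_iff_eq,
          decide_eq_true_eq, List.cons_ne_nil, false_or]
        push_cast
        omega
    · have hb : (x == 1) = false := by simp [hx]
      rw [show pvContig (x :: l) = pvContig l by simp [pvContig, hx]]
      simp only [hb, Bool.false_eq_true, if_false, List.nil_append]
      exact ih (s + 1)

theorem solveGo_false (r : List Int) : ∀ a : Int, solveGo a r false = r.all (fun y => y != 1) := by
  induction r with
  | nil => intro a; simp [solveGo]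
  | cons x r ih =>
    intro a
    by_cases hx : x = 1 <;> simp [solveGo, hx, ih x]

theorem solveGo_true (r : List Int) : ∀ a : Int,
    solveGo a r true = if a == 1 then pvOnes1 r else pvContig r := by
  induction r with
  | nil => intro a; by_cases h : a = 1 <;> simp [solveGo, pvOnes1, pvContig, h]
  | cons x r ih =>
    intro a
    rcases eq_or_ne x 1 with hx | hx
    · subst hx
      rcases eq_or_ne a 1 with ha | ha <;>
        simp [solveGo, ha, ih 1, pvOnes1, pvContig]
    · rcases eq_or_ne a 1 with ha | ha <;>
        simp [solveGo, ha, hx, ih x, solveGo_false r x, pvOnes1, pvContig]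

theorem solve_eq_alt (nums : List Int) : solve nums = solve_alt nums := by
  have halt : solve_alt nums = pvTest (pvPos 0 nums) := rfl
  rw [halt, pvContig_eq nums 0]
  cases nums with
  | nil => simp [solve, pvContig]
  | cons a r =>
    simp only [solve, solveGo_true r a, pvContig]

-- ===== VERDICT (by name: the statement is the Claim_ definition above) =====
theorem solve_spec : Claim_equal_solve := by
  intro nums _
  unfold Spec_solve
  exact solve_eq_alt nums
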